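-- pv_equiv track=rewrite | github.com/AaryanNanda1/F1-Tire-Deg-Predictor | strategy_optimizer.py | _enumerate_lengths
-- ===== SOURCE A (Python) =====
-- from typing import Dict, Iterable, List, Tuple
--
-- def _enumerate_lengths(
--     ranges: List[Tuple[int, int]],
--     total_laps: int,
--     step: int = 2,
-- ) -> Iterable[Tuple[int, ...]]:
--     n = len(ranges)
--     if n == 1:
--         lo, hi = ranges[0]
--         if lo <= total_laps <= hi:
--             yield (total_laps,)
--         return
--
--     def rec(idx: int, used: List[int], remaining: int):
--         if idx == n - 1:
--             lo, hi = ranges[idx]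
--             if lo <= remaining <= hi:
--                 yield tuple(used + [remaining])
--             return
--         lo, hi = ranges[idx]
--         for length in range(lo, hi + 1, step):
--             if length >= remaining:
--                 continue
--             yield from rec(idx + 1, used + [length], remaining - length)
--
--     yield from rec(0, [], total_laps)
-- ===== SOURCE B (Python) =====
-- def _enumerate_lengths(ranges, total_laps, step=2):
--     # Level-wise frontier expansion instead of recursion: extend all partial
--     # prefixes range by range, then finish with the last range's bounds check.
--     frontier = [((), total_laps)]
--     for lo, hi in ranges[:-1]:
--         frontier = [(used + (length,), rem - length)
--                     for used, rem in frontier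
--                     for length in range(lo, hi + 1, step)
--                     if length < rem]
--     lo, hi = ranges[-1]
--     for used, rem in frontier:
--         if lo <= rem <= hi:
--             yield used + (rem,)
-- ===== Notes on version B (the rewrite author's own statement) =====
-- stated objective: alternative
-- what changed: Replaces A's recursive generator DFS with an iterative level-wise frontier expansion: a fold over all but the last range extends every partial prefix at once, then a single final filter over the last range emits the tuples in the same lexicographic order.
import Mathlib
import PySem

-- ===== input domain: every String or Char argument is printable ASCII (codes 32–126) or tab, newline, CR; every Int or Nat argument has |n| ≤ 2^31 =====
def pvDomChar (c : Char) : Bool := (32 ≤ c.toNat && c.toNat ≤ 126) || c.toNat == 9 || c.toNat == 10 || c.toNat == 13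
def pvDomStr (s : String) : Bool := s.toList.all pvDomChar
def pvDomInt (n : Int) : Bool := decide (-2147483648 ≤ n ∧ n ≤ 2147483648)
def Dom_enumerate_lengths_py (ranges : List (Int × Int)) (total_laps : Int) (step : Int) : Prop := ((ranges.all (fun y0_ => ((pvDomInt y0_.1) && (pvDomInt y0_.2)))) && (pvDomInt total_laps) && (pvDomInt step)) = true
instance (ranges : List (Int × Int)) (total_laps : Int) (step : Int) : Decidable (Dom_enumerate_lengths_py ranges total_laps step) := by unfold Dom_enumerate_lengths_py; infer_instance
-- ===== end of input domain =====

-- B replaces A's recursive generator by an iterative level-wise frontier expansion over the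
-- ranges (same outputs in the same order); objective: alternative decomposition, not speed.

-- ===== PORT A =====
-- the inner generator `rec(idx, used, remaining)`; the list argument is ranges[idx:]
def pvRecA (step : Int) : List (Int × Int) → List Int → Int → List (List Int)
  | [], _, _ => []          -- unreachable from the entry point (Pre_ excludes ranges = [])
  | [(lo, hi)], used, remaining =>
      if lo ≤ remaining ∧ remaining ≤ hi then [used ++ [remaining]] else []
  | (lo, hi) :: r :: rest, used, remaining =>
      (PySem.List.pyRange lo (hi + 1) step).foldl
        (fun acc length =>
          if length ≥ remaining then acc
          else acc ++ pvRecA step (r :: rest) (used ++ [length]) (remaining - length)) []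
  termination_by rs _ _ => rs.length
  decreasing_by simp

def enumerate_lengths_py (ranges : List (Int × Int)) (total_laps : Int) (step : Int) : List (List Int) :=
  match ranges with
  | [] => []                -- Python raises IndexError here (excluded by Pre_)
  | [(lo, hi)] => if lo ≤ total_laps ∧ total_laps ≤ hi then [[total_laps]] else []
  | rs => pvRecA step rs [] total_laps

-- ===== PORT B =====
-- one frontier-expansion step: the list comprehension of Source B
def pvExtend (step lo hi : Int) (frontier : List (List Int × Int)) : List (List Int × Int) :=
  frontier.flatMap (fun ur =>
    (PySem.List.pyRange lo (hi + 1) step).filterMap (fun length =>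
      if length < ur.2 then some (ur.1 ++ [length], ur.2 - length) else none))

def enumerate_lengths_py_alt (ranges : List (Int × Int)) (total_laps : Int) (step : Int) : List (List Int) :=
  match ranges.getLast? with
  | none => []              -- ranges = []: Python raises IndexError (excluded by Pre_)
  | some (lo, hi) =>
      let frontier := ranges.dropLast.foldl (fun fr p => pvExtend step p.1 p.2 fr) [([], total_laps)]
      frontier.filterMap (fun ur => if lo ≤ ur.2 ∧ ur.2 ≤ hi then some (ur.1 ++ [ur.2]) else none)

-- ===== PRECONDITION & SPEC =====
-- Pre_ excludes exactly where Python A raises: ranges = [] (IndexError) and, when the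
-- recursive path is taken (two or more ranges), step = 0 (ValueError from range()).
def Pre_enumerate_lengths_py (ranges : List (Int × Int)) (total_laps : Int) (step : Int) : Prop :=
  ranges ≠ [] ∧ (ranges.length = 1 ∨ step ≠ 0)
instance (ranges : List (Int × Int)) (total_laps : Int) (step : Int) : Decidable (Pre_enumerate_lengths_py ranges total_laps step) := by unfold Pre_enumerate_lengths_py; infer_instance

def pvWitness_enumerate_lengths_py : (List (Int × Int)) × Int × Int := ([(1, 5), (1, 5)], 6, 2)

def Spec_enumerate_lengths_py (ranges : List (Int × Int)) (total_laps : Int) (step : Int) (out : List (List Int)) : Prop := out = enumerate_lengths_py_alt ranges total_laps step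
instance (ranges : List (Int × Int)) (total_laps : Int) (step : Int) (out : List (List Int)) : Decidable (Spec_enumerate_lengths_py ranges total_laps step out) := by unfold Spec_enumerate_lengths_py; infer_instance

-- ===== CLAIM (what is proved, stated in full; the proofs are below) =====
def Claim_equal_enumerate_lengths_py : Prop := ∀ (ranges : List (Int × Int)) (total_laps : Int) (step : Int), Dom_enumerate_lengths_py ranges total_laps step → Pre_enumerate_lengths_py ranges total_laps step → Spec_enumerate_lengths_py ranges total_laps step (enumerate_lengths_py ranges total_laps step)

-- ===== LEMMAS AND PROOFS =====

-- loop shape of A's inner `for`: skip-or-extend foldl is a filter + flatMap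
lemma pv_foldl_skip {α β : Type} (xs : List α) (p : α → Prop) [DecidablePred p] (g : α → List β) (acc : List β) :
    xs.foldl (fun a x => if p x then a else a ++ g x) acc
      = acc ++ (xs.filter (fun x => !decide (p x))).flatMap g := by
  induction xs generalizing acc with
  | nil => simp
  | cons x xs ih =>
      by_cases h : p x <;> simp [ih, h, List.append_assoc]

-- the comprehension's filtered some/none is a filter + map
lemma pv_filterMap_guard {α β : Type} (xs : List α) (p : α → Prop) [DecidablePred p] (f : α → β) :
    xs.filterMap (fun x => if p x then some (f x) else none)
      = (xs.filter (fun x => decide (p x))).map f := by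
  induction xs with
  | nil => rfl
  | cons x xs ih => by_cases h : p x <;> simp [h, ih]

-- one unfolding of A's recursion in filter/flatMap form
lemma pvRecA_cons (step plo phi : Int) (r : Int × Int) (rest : List (Int × Int))
    (used : List Int) (remaining : Int) :
    pvRecA step ((plo, phi) :: r :: rest) used remaining
      = ((PySem.List.pyRange plo (phi + 1) step).filter (fun l => !decide (l ≥ remaining))).flatMap
          (fun l => pvRecA step (r :: rest) (used ++ [l]) (remaining - l)) := by
  rw [pvRecA, pv_foldl_skip (p := fun length => length ≥ remaining), List.nil_append]

-- the frontier invariant: folding B's extension over `init` and then applying B's final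
-- filter equals running A's recursion on `init ++ [(lo,hi)]` from every frontier element
lemma pv_key (step : Int) (init : List (Int × Int)) :
    ∀ (lo hi : Int) (frontier : List (List Int × Int)),
    (init.foldl (fun fr p => pvExtend step p.1 p.2 fr) frontier).filterMap
        (fun ur => if lo ≤ ur.2 ∧ ur.2 ≤ hi then some (ur.1 ++ [ur.2]) else none)
      = frontier.flatMap (fun ur => pvRecA step (init ++ [(lo, hi)]) ur.1 ur.2) := by
  induction init with
  | nil =>
      intro lo hi frontier
      simp only [List.foldl_nil, List.nil_append]
      induction frontier with
      | nil => simp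
      | cons ur fr ih =>
          by_cases h : lo ≤ ur.2 ∧ ur.2 ≤ hi <;>
            simp [pvRecA, h, ih]
  | cons p init' ih =>
      intro lo hi frontier
      rw [List.foldl_cons, ih]
      unfold pvExtend
      rw [List.flatMap_assoc]
      refine List.flatMap_congr (fun ur _ => ?_)
      obtain ⟨plo, phi⟩ := p
      obtain ⟨r1, r2, hrest⟩ : ∃ a b, init' ++ [(lo, hi)] = a :: b := by
        cases init' <;> exact ⟨_, _, rfl⟩
      rw [List.cons_append, hrest, pvRecA_cons, ← hrest]
      rw [pv_filterMap_guard (p := fun l => l < ur.2), List.flatMap_map]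
      rw [List.filter_congr (fun l _ => by rw [← decide_not]; exact decide_eq_decide.mpr (by omega) :
        ∀ l ∈ PySem.List.pyRange plo (phi + 1) step,
          (decide (l < ur.2)) = (!decide (l ≥ ur.2)))]

-- ===== VERDICT (by name: the statement is the Claim_ definition above) =====
theorem enumerate_lengths_py_spec : Claim_equal_enumerate_lengths_py := by
  intro ranges total_laps step _ hpre
  unfold Spec_enumerate_lengths_py
  match ranges with
  | [] => exact absurd rfl hpre.1
  | [(lo, hi)] =>
      simp [enumerate_lengths_py, enumerate_lengths_py_alt, List.filterMap_cons]
      split_ifs <;> rfl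
  | (p :: q :: rest) =>
      have hne : (p :: q :: rest) ≠ ([] : List (Int × Int)) := by simp
      have hlast : (p :: q :: rest).getLast? = some ((p :: q :: rest).getLast hne) :=
        List.getLast?_eq_some_getLast hne
      have hsplit : (p :: q :: rest).dropLast ++ [(p :: q :: rest).getLast hne]
          = p :: q :: rest := List.dropLast_concat_getLast hne
      unfold enumerate_lengths_py enumerate_lengths_py_alt
      rw [hlast]
      rcases hl : (p :: q :: rest).getLast hne with ⟨lo, hi⟩
      simp only
      rw [pv_key, ← hl, hsplit]
      simp
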